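-- pv_equiv track=rewrite | github.com/Najamhassan86/essay-grading | annotate_pdf_with_essay_rubric.py | _union_bboxes
-- ===== SOURCE A (Python) =====
-- from typing import Any, Dict, List, Tuple, Optional
--
-- def _union_bboxes(bboxes: List[List[Tuple[int, int]]], pad: int, w: int, h: int) -> Optional[Tuple[int, int, int, int]]:
--     if not bboxes:
--         return None
--     xs: List[int] = []
--     ys: List[int] = []
--     for bb in bboxes:
--         for (x, y) in bb:
--             xs.append(x)
--             ys.append(y)
--     if not xs or not ys:
--         return None
--     x1 = max(0, min(xs) - pad)
--     y1 = max(0, min(ys) - pad)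
--     x2 = min(w - 1, max(xs) + pad)
--     y2 = min(h - 1, max(ys) + pad)
--     return x1, y1, x2, y2
-- ===== SOURCE B (Python) =====
-- from typing import List, Tuple, Optional
--
-- def _union_bboxes(bboxes: List[List[Tuple[int, int]]], pad: int, w: int, h: int) -> Optional[Tuple[int, int, int, int]]:
--     ext = None  # (minx, miny, maxx, maxy) of points seen so far
--     for bb in bboxes:
--         for (x, y) in bb:
--             if ext is None:
--                 ext = (x, y, x, y)
--             else:
--                 a, b, c, d = ext
--                 ext = (min(a, x), min(b, y), max(c, x), max(d, y))
--     if ext is None: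
--         return None
--     a, b, c, d = ext
--     return max(0, a - pad), max(0, b - pad), min(w - 1, c + pad), min(h - 1, d + pad)
-- ===== Notes on version B (the rewrite author's own statement) =====
-- stated objective: simpler
-- what changed: Replaces building xs/ys lists followed by four separate min/max scans with a single streaming pass that maintains one running (minx,miny,maxx,maxy) extrema tuple, so no intermediate lists and no rescans.
import Mathlib
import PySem

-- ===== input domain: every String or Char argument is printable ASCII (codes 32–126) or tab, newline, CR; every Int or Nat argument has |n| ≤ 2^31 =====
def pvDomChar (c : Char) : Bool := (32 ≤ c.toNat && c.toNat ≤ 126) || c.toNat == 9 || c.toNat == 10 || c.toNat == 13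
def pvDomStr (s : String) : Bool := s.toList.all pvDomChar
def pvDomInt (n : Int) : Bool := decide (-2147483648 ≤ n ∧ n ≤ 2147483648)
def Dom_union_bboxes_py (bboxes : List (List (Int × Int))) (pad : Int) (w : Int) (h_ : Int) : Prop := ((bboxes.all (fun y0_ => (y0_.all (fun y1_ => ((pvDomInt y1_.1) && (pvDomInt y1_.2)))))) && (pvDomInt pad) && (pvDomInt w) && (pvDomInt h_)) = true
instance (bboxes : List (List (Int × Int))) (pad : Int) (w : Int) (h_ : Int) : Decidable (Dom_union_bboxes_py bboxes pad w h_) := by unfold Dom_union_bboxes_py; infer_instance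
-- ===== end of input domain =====

-- ===== PORT A =====
-- B replaces A's build-xs/ys-then-four-scans with one streaming pass keeping running extrema (objective: simpler).
def union_bboxes_py (bboxes : List (List (Int × Int))) (pad : Int) (w : Int) (h_ : Int) : Option (Int × Int × Int × Int) :=
  if bboxes = [] then none
  else
    -- for bb in bboxes: for (x,y) in bb: xs.append(x); ys.append(y)
    let xsys : List Int × List Int :=
      bboxes.foldl (fun acc bb =>
        bb.foldl (fun acc2 p => (acc2.1 ++ [p.1], acc2.2 ++ [p.2])) acc) ([], [])
    let xs := xsys.1
    let ys := xsys.2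
    if xs = [] ∨ ys = [] then none
    else
      match PySem.List.min? xs (fun v => v), PySem.List.min? ys (fun v => v),
            PySem.List.max? xs (fun v => v), PySem.List.max? ys (fun v => v) with
      | some mnx, some mny, some mxx, some mxy =>
        some (max 0 (mnx - pad), max 0 (mny - pad), min (w - 1) (mxx + pad), min (h_ - 1) (mxy + pad))
      | _, _, _, _ => none

-- ===== PORT B =====
def union_bboxes_py_alt (bboxes : List (List (Int × Int))) (pad : Int) (w : Int) (h_ : Int) : Option (Int × Int × Int × Int) :=
  let ext : Option (Int × Int × Int × Int) :=
    bboxes.foldl (fun st bb =>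
      bb.foldl (fun st2 p =>
        match st2 with
        | none => some (p.1, p.2, p.1, p.2)
        | some (a, b, c, d) => some (min a p.1, min b p.2, max c p.1, max d p.2)) st) none
  match ext with
  | none => none
  | some (a, b, c, d) =>
      some (max 0 (a - pad), max 0 (b - pad), min (w - 1) (c + pad), min (h_ - 1) (d + pad))

-- ===== PRECONDITION & SPEC =====
def Spec_union_bboxes_py (bboxes : List (List (Int × Int))) (pad : Int) (w : Int) (h_ : Int) (out : Option (Int × Int × Int × Int)) : Prop := out = union_bboxes_py_alt bboxes pad w h_
instance (bboxes : List (List (Int × Int))) (pad : Int) (w : Int) (h_ : Int) (out : Option (Int × Int × Int × Int)) : Decidable (Spec_union_bboxes_py bboxes pad w h_ out) := by unfold Spec_union_bboxes_py; infer_instance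

-- ===== CLAIM (what is proved, stated in full; the proofs are below) =====
def Claim_equal_union_bboxes_py : Prop := ∀ (bboxes : List (List (Int × Int))) (pad : Int) (w : Int) (h_ : Int), Dom_union_bboxes_py bboxes pad w h_ → Spec_union_bboxes_py bboxes pad w h_ (union_bboxes_py bboxes pad w h_)

-- ===== LEMMAS AND PROOFS =====

-- ===== VERDICT (by name: the statement is the Claim_ definition above) =====
-- step function of B's streaming pass
def pvStep (st : Option (Int × Int × Int × Int)) (p : Int × Int) : Option (Int × Int × Int × Int) :=
  match st with
  | none => some (p.1, p.2, p.1, p.2)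
  | some (a, b, c, d) => some (min a p.1, min b p.2, max c p.1, max d p.2)

theorem pvStep_eq (st : Option (Int × Int × Int × Int)) (p : Int × Int) :
    (fun st2 (p : Int × Int) =>
        match st2 with
        | none => some (p.1, p.2, p.1, p.2)
        | some (a, b, c, d) => some (min a p.1, min b p.2, max c p.1, max d p.2)) st p
      = pvStep st p := rfl

-- A's collection loop over flattened points
theorem pvCollect (ps : List (Int × Int)) (xs ys : List Int) :
    ps.foldl (fun acc2 p => (acc2.1 ++ [p.1], acc2.2 ++ [p.2])) (xs, ys)
      = (xs ++ ps.map Prod.fst, ys ++ ps.map Prod.snd) := by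
  induction ps generalizing xs ys with
  | nil => simp
  | cons p t ih => simp [List.foldl_cons, ih]

-- B's streaming pass from a known state is four running folds
theorem pvStream (ps : List (Int × Int)) (a b c d : Int) :
    ps.foldl pvStep (some (a, b, c, d))
      = some (ps.foldl (fun m p => min m p.1) a, ps.foldl (fun m p => min m p.2) b,
              ps.foldl (fun m p => max m p.1) c, ps.foldl (fun m p => max m p.2) d) := by
  induction ps generalizing a b c d with
  | nil => rfl
  | cons p t ih => simp [List.foldl_cons, pvStep, ih]

theorem union_bboxes_py_spec : Claim_equal_union_bboxes_py := by
  unfold Claim_equal_union_bboxes_py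
  intro bboxes pad w h_ _
  unfold Spec_union_bboxes_py union_bboxes_py union_bboxes_py_alt
  simp only [← List.foldl_flatten, pvStep_eq]
  rw [pvCollect bboxes.flatten [] []]
  cases hf : bboxes.flatten with
  | nil =>
    cases bboxes with
    | nil => simp
    | cons bb t => simp
  | cons p ps =>
    have hb : bboxes ≠ [] := by
      intro h; rw [h] at hf; simp at hf
    simp only [List.map_cons, List.nil_append, if_neg hb]
    rw [List.foldl_cons, pvStep]
    rw [pvStream]
    simp [PySem.List.min?_id_cons, PySem.List.max?_id_cons, List.foldl_map]

-- ===== VERDICT (by name: the statement is the Claim_ definition above) =====
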